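-- pv_equiv track=rewrite | github.com/errantlinguist/tangrams-restricted | analysis/scripts/token_groups.py | create_group_token_set_dict
-- ===== SOURCE A (Python) =====
-- from collections import defaultdict
-- from typing import Callable, Dict, FrozenSet, Iterable, Iterator, List, Mapping, Set, Tuple
--
-- TokenGroupMapping = Mapping[str, FrozenSet[str]]
--
-- def create_group_token_set_dict(tokens: Iterable[str], token_groups: TokenGroupMapping) -> Dict[
-- 	str, Set[str]]:
-- 	result = defaultdict(set)
-- 	for token in tokens:
-- 		try:
-- 			groups = token_groups[token]
-- 			for group in groups:
-- 				result[group].add(token)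
-- 		except KeyError:
-- 			# Do nothing with tokens which don't have a semantic group
-- 			pass
--
-- 	return result
-- ===== SOURCE B (Python) =====
-- from collections import defaultdict
--
--
-- def create_group_token_set_dict(tokens, token_groups):
--     tokens = list(tokens)
--     ordered_groups = dict.fromkeys(
--         g for t in tokens for g in token_groups.get(t, ()))
--     result = defaultdict(set)
--     for group in ordered_groups:
--         result[group] = {t for t in tokens
--                          if group in token_groups.get(t, ())}
--     return result
-- ===== Notes on version B (the rewrite author's own statement) =====
-- stated objective: alternative
-- what changed: Instead of A's single incremental pass that inserts each token into every one of its groups' sets, B first computes the ordered list of distinct groups by flattening and deduplicating, then builds each group's token set directly with one full filtering scan of the token stream per group.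
import Mathlib
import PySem

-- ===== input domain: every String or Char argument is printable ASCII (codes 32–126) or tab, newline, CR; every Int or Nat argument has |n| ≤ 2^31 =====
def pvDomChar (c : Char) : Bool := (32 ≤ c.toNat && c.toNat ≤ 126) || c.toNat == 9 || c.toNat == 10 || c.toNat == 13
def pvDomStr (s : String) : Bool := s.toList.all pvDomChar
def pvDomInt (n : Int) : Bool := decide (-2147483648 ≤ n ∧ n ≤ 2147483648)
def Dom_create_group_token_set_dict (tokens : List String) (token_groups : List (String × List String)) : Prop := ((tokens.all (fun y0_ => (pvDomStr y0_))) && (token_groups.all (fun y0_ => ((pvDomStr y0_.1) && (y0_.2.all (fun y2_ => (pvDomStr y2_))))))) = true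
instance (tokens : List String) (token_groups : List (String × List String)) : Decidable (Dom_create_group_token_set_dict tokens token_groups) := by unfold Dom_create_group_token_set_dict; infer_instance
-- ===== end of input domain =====

-- B builds the mapping in two staged passes (dedup'd group order first, then one filtering
-- scan of the token stream per group) instead of A's single incremental insertion pass:
-- a different decomposition with the same return value, no speed claim.


-- ===== PORT A =====
-- result = defaultdict(set); for token in tokens: try: groups = token_groups[token];
--   for group in groups: result[group].add(token)  (KeyError -> skip); return result
def create_group_token_set_dict (tokens : List String) (token_groups : List (String × List String)) : List (String × List String) :=
  (tokens.foldl (fun result token =>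
      match (PySem.Dict.mk token_groups).get? token with
      | some groups =>
          groups.foldl (fun result group =>
            result.insert group (PySem.Set.add (result.getD group PySem.Set.empty) token)) result
      | none => result)
    PySem.Dict.empty).items

-- ===== PORT B =====
-- ordered_groups = dict.fromkeys(g for t in tokens for g in token_groups.get(t, ()))
-- for group in ordered_groups: result[group] = {t for t in tokens if group in token_groups.get(t, ())}
def create_group_token_set_dict_alt (tokens : List String) (token_groups : List (String × List String)) : List (String × List String) :=
  let ordered_groups : List String :=
    PySem.List.dedup (tokens.flatMap (fun t => (PySem.Dict.mk token_groups).getD t []))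
  (ordered_groups.foldl (fun result group =>
      result.insert group
        (PySem.Set.ofList (tokens.filter (fun t =>
          ((PySem.Dict.mk token_groups).getD t []).contains group))))
    PySem.Dict.empty).items

-- ===== PRECONDITION & SPEC =====
def Spec_create_group_token_set_dict (tokens : List String) (token_groups : List (String × List String)) (out : List (String × List String)) : Prop := out = create_group_token_set_dict_alt tokens token_groups
instance (tokens : List String) (token_groups : List (String × List String)) (out : List (String × List String)) : Decidable (Spec_create_group_token_set_dict tokens token_groups out) := by unfold Spec_create_group_token_set_dict; infer_instance

-- ===== CLAIM (what is proved, stated in full; the proofs are below) =====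
def Claim_equal_create_group_token_set_dict : Prop := ∀ (tokens : List String) (token_groups : List (String × List String)), Dom_create_group_token_set_dict tokens token_groups → Spec_create_group_token_set_dict tokens token_groups (create_group_token_set_dict tokens token_groups)

-- ===== LEMMAS AND PROOFS =====

-- A's inner loop over one token's group list, observed at group g
theorem inner_getD (groups : List String) (t g : String)
    (d : PySem.Dict String (List String)) :
    (groups.foldl (fun r h => r.insert h (PySem.Set.add (r.getD h PySem.Set.empty) t)) d).getD g PySem.Set.empty
    = if groups.contains g then PySem.Set.add (d.getD g PySem.Set.empty) t
      else d.getD g PySem.Set.empty := by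
  induction groups generalizing d with
  | nil => simp
  | cons h rest ih =>
    simp only [List.foldl_cons, ih, List.contains_cons, PySem.Dict.getD_insert]
    by_cases hg : g = h
    · subst hg
      simp
    · simp [hg]

-- A's whole fold, observed at group g: all matching tokens get added in stream order
theorem outer_getD (tokens : List String) (token_groups : List (String × List String))
    (g : String) (d : PySem.Dict String (List String)) :
    ((tokens.foldl (fun result token =>
        match (PySem.Dict.mk token_groups).get? token with
        | some groups =>
            groups.foldl (fun result group =>
              result.insert group (PySem.Set.add (result.getD group PySem.Set.empty) token)) result
        | none => result) d).getD g PySem.Set.empty)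
    = (tokens.filter (fun t =>
        ((PySem.Dict.mk token_groups).getD t []).contains g)).foldl PySem.Set.add
        (d.getD g PySem.Set.empty) := by
  induction tokens generalizing d with
  | nil => simp
  | cons t ts ih =>
    simp only [List.foldl_cons, List.filter_cons]
    cases hget : (PySem.Dict.mk token_groups).get? t with
    | none =>
      have : ((PySem.Dict.mk token_groups).getD t []).contains g = false := by
        rw [PySem.Dict.getD_eq_get?_getD, hget]; simp
      simp only [this, Bool.false_eq_true, if_false]
      exact ih d
    | some groups =>
      have hgd : (PySem.Dict.mk token_groups).getD t [] = groups := by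
        rw [PySem.Dict.getD_eq_get?_getD, hget]; rfl
      rw [ih, inner_getD, hgd]
      by_cases hm : g ∈ groups
      · have hc : groups.contains g = true := by simpa using hm
        simp [hm]
      · have hc : groups.contains g = false := by simpa using hm
        simp [hm]

-- A's whole fold: the key list is the dedup'd flattening of the tokens' group lists
theorem outer_keys (tokens : List String) (token_groups : List (String × List String))
    (d : PySem.Dict String (List String)) :
    ((tokens.foldl (fun result token =>
        match (PySem.Dict.mk token_groups).get? token with
        | some groups =>
            groups.foldl (fun result group =>
              result.insert group (PySem.Set.add (result.getD group PySem.Set.empty) token)) result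
        | none => result) d).keys)
    = (tokens.flatMap (fun t => (PySem.Dict.mk token_groups).getD t [])).foldl PySem.Set.add d.keys := by
  induction tokens generalizing d with
  | nil => simp
  | cons t ts ih =>
    simp only [List.foldl_cons, List.flatMap_cons, List.foldl_append]
    cases hget : (PySem.Dict.mk token_groups).get? t with
    | none =>
      have : (PySem.Dict.mk token_groups).getD t [] = [] := by
        rw [PySem.Dict.getD_eq_get?_getD, hget]; rfl
      rw [this]
      simp only [List.foldl_nil]
      exact ih d
    | some groups =>
      have hgd : (PySem.Dict.mk token_groups).getD t [] = groups := by
        rw [PySem.Dict.getD_eq_get?_getD, hget]; rfl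
      rw [hgd, ih, PySem.Dict.keys_foldl_insert]
      rfl

-- ===== VERDICT (by name: the statement is the Claim_ definition above) =====
theorem create_group_token_set_dict_spec : Claim_equal_create_group_token_set_dict := by
  intro tokens token_groups _
  unfold Spec_create_group_token_set_dict create_group_token_set_dict create_group_token_set_dict_alt
  dsimp only
  set dA := tokens.foldl (fun result token =>
      match (PySem.Dict.mk token_groups).get? token with
      | some groups =>
          groups.foldl (fun result group =>
            result.insert group (PySem.Set.add (result.getD group PySem.Set.empty) token)) result
      | none => result) PySem.Dict.empty with hdA
  have hkeys : dA.keys = PySem.List.dedup (tokens.flatMap (fun t => (PySem.Dict.mk token_groups).getD t [])) := by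
    rw [hdA, outer_keys]
    rw [PySem.List.dedup_eq_ofList, PySem.Set.ofList_eq_foldl]
    rfl
  have hnodup : dA.keys.Nodup := by
    rw [hkeys]; exact PySem.List.nodup_dedup _
  rw [PySem.Dict.items_eq_map_keys dA hnodup PySem.Set.empty, hkeys]
  rw [PySem.Dict.items_foldl_insert_fresh
        (PySem.List.dedup (tokens.flatMap (fun t => (PySem.Dict.mk token_groups).getD t [])))
        (fun g => g)
        (fun group => PySem.Set.ofList (tokens.filter (fun t =>
          ((PySem.Dict.mk token_groups).getD t []).contains group)))
        PySem.Dict.empty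
        (fun a _ => PySem.Dict.contains_empty a)
        (by
          rw [show List.map (fun g : String => g) (PySem.List.dedup (tokens.flatMap (fun t => (PySem.Dict.mk token_groups).getD t []))) = PySem.List.dedup (tokens.flatMap (fun t => (PySem.Dict.mk token_groups).getD t [])) from List.map_id _]
          exact PySem.List.nodup_dedup _)]
  rw [show (PySem.Dict.empty : PySem.Dict String (List String)).items = [] from rfl, List.nil_append]
  apply List.map_congr_left
  intro g _
  rw [hdA, outer_getD tokens token_groups g PySem.Dict.empty, PySem.Dict.getD_empty,
      PySem.Set.ofList_eq_foldl]
  rfl
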